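-- pv_equiv track=rewrite | github.com/KaYunKIM/ssafy | kayunkim/문제풀이/Programmers/PYTHON/카카오/징검다리 건너기.py | solution
-- ===== SOURCE A (Python) =====
-- def solution(stones, k):
--     answer = 0
--
--     temp = 0
--     while temp < k:
--         for i in range(len(stones)):
--             if stones[i]:
--                 stones[i] -= 1
--             else:
--                 temp += 1
--             if temp == k:
--                 break
--
--         answer += 1
--         if sum(stones) == 0:
--             return answer
--
--     return answer
-- ===== SOURCE B (Python) =====
-- def solution(stones, k):
--     # Binary search on the number of passes; equivalence is about the return
--     # value only (A mutates `stones` in place, B does not).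
--     if k <= 0:
--         return 0
--     cap = max(max(stones), 1) if stones else 1
--
--     def cum(P):
--         # total zero-stone encounters over the first P passes
--         return sum(P - v for v in stones if v < P)
--
--     if cum(cap) < k:
--         return cap
--     lo, hi = 1, cap
--     while lo < hi:
--         mid = (lo + hi) // 2
--         if cum(mid) >= k:
--             hi = mid
--         else:
--             lo = mid + 1
--     return lo
-- ===== Notes on version B (the rewrite author's own statement) =====
-- stated objective: faster
-- what changed: Replaces A's pass-by-pass in-place simulation of the stone array with a binary search over the number of passes P, using the closed form cum(P) = sum(max(P - v, 0)) for the cumulative zero-stone encounters (and max(stones) as the pass where the array empties); for k >= 1, Pre_ excludes lists containing a negative stone, where A's simulation decrements the negative entries forever (diverging when all stones are negative, and returning pass counts that are artefacts of the endless decrementing otherwise).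
-- outside the precondition, e.g. on solution([-1, 2], 3): A returns 5, B returns 2
import Mathlib
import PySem

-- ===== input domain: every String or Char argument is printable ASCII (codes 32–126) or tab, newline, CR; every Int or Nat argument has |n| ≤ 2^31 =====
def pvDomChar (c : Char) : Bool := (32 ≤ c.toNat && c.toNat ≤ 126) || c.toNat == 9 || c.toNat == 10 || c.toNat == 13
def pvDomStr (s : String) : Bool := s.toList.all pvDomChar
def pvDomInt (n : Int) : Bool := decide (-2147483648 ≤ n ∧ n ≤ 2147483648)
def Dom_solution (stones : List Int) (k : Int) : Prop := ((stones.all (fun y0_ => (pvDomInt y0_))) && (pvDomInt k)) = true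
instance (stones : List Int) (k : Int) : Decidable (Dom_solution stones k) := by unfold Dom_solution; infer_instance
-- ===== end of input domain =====

-- B replaces A's pass-by-pass simulation with a binary search over the number of passes;
-- A mutates `stones` in place, B does not — the equivalence proved here is about the return value only.

-- ===== PORT A =====
-- one inner `for i in range(len(stones))` pass: decrement nonzero stones, count zero ones, break at temp == k
def aPassAux (k : Int) : List Int → Int → List Int → List Int × Int
  | [], temp, acc => (acc.reverse, temp)
  | s :: rest, temp, acc =>
    let s' := if s ≠ 0 then s - 1 else s
    let temp' := if s ≠ 0 then temp else temp + 1
    if temp' = k then (acc.reverse ++ s' :: rest, temp')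
    else aPassAux k rest temp' (s' :: acc)

-- the `while temp < k` loop; the fuel only makes the loop total (under Pre_ it never runs out)
def aLoop (k : Int) : Nat → List Int → Int → Int → Int
  | 0, _, _, answer => answer
  | fuel + 1, stones, temp, answer =>
    if temp < k then
      let r := aPassAux k stones temp []
      let answer' := answer + 1
      if r.1.sum = 0 then answer'
      else aLoop k fuel r.1 r.2 answer'
    else answer

def solution (stones : List Int) (k : Int) : Int :=
  aLoop k ((stones.foldl max 0).toNat + 2) stones 0 0

-- ===== PORT B =====
-- cum(P) = sum(P - v for v in stones if v < P)
def cumAlt (stones : List Int) (P : Int) : Int :=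
  ((stones.filter (fun v => v < P)).map (fun v => P - v)).sum

-- while lo < hi: mid = (lo+hi)//2; if cum(mid) >= k: hi = mid else lo = mid+1
def bsearchAlt (stones : List Int) (k : Int) (lo hi : Int) : Int :=
  if h : lo < hi then
    let mid := PySem.Int.floordiv (lo + hi) 2
    if k ≤ cumAlt stones mid then bsearchAlt stones k lo mid
    else bsearchAlt stones k (mid + 1) hi
  else lo
termination_by (hi - lo).toNat
decreasing_by
  · have h1 := (PySem.Int.le_floordiv_iff_mul_le (a := lo + hi) (b := 2) (q := lo) (by omega)).mpr (by omega)
    have h2 := (PySem.Int.floordiv_lt_iff_lt_mul (a := lo + hi) (b := 2) (q := hi) (by omega)).mpr (by omega)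
    omega
  · have h1 := (PySem.Int.le_floordiv_iff_mul_le (a := lo + hi) (b := 2) (q := lo) (by omega)).mpr (by omega)
    have h2 := (PySem.Int.floordiv_lt_iff_lt_mul (a := lo + hi) (b := 2) (q := hi) (by omega)).mpr (by omega)
    omega

def solution_alt (stones : List Int) (k : Int) : Int :=
  if k ≤ 0 then 0
  else
    let cap := match PySem.List.max? stones (fun x => x) with
      | some m => max m 1
      | none => 1
    if cumAlt stones cap < k then cap
    else bsearchAlt stones k 1 cap

-- ===== PRECONDITION & SPEC =====
-- Pre_ restricts to the task's natural domain: for k ≥ 1 the stones must be nonnegative durabilities —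
-- on lists containing a negative stone A's simulation decrements that entry forever (diverging when all
-- stones are negative, and returning pass counts that are artefacts of the endless decrementing otherwise);
-- for k ≤ 0 the loop never runs, so every stones list is admitted there.
def Pre_solution (stones : List Int) (k : Int) : Prop := k ≤ 0 ∨ ∀ s ∈ stones, 0 ≤ s
instance (stones : List Int) (k : Int) : Decidable (Pre_solution stones k) := by unfold Pre_solution; infer_instance
def pvWitness_solution : List Int × Int := ([2, 1, 4, 0, 3], 3)

def Spec_solution (stones : List Int) (k : Int) (out : Int) : Prop := out = solution_alt stones k
instance (stones : List Int) (k : Int) (out : Int) : Decidable (Spec_solution stones k out) := by unfold Spec_solution; infer_instance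

-- ===== CLAIM (what is proved, stated in full; the proofs are below) =====
def Claim_equal_solution : Prop := ∀ (stones : List Int) (k : Int), Dom_solution stones k → Pre_solution stones k → Spec_solution stones k (solution stones k)

-- ===== LEMMAS AND PROOFS =====

-- mathematical scaffolding (used only by the proofs)
def cumM (v : List Int) (P : Int) : Int := (v.map (fun s => max (P - s) 0)).sum
def shiftL (v : List Int) (j : Int) : List Int := v.map (fun s => max (s - j) 0)
def Zc (w : List Int) : Int := ((w.filter (fun s => s == 0)).length : Int)
def mcap (v : List Int) : Int := max (v.foldl max 0) 1
def CharS (v : List Int) (k r : Int) : Prop :=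
  1 <= r ∧ r <= mcap v ∧ (k <= cumM v r ∨ r = mcap v) ∧ ∀ p, 1 <= p → p < r → cumM v p < k

theorem cumAlt_eq_cumM (v : List Int) (P : Int) : cumAlt v P = cumM v P := by
  induction v with
  | nil => simp [cumAlt, cumM]
  | cons s t ih =>
    simp only [cumAlt, cumM, List.filter_cons, List.map_cons, List.sum_cons] at *
    by_cases h : s < P
    · simp only [h, decide_true, if_true, List.map_cons, List.sum_cons]
      omega
    · simp only [h, decide_false, Bool.false_eq_true, if_false]
      omega

theorem cumM_mono (v : List Int) {p q : Int} (h : p <= q) : cumM v p <= cumM v q := by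
  induction v with
  | nil => simp [cumM]
  | cons s t ih => simp only [cumM, List.map_cons, List.sum_cons] at *; omega

theorem Zc_nonneg (w : List Int) : 0 <= Zc w := by
  simp [Zc]

theorem Zc_cons (s : Int) (w : List Int) :
    Zc (s :: w) = (if s = 0 then 1 else 0) + Zc w := by
  by_cases h : s = 0 <;> simp [Zc, List.filter_cons, h] <;> omega

theorem cumM_succ (v : List Int) (j : Int) : cumM v (j + 1) = cumM v j + Zc (shiftL v j) := by
  induction v with
  | nil => simp [cumM, shiftL, Zc]
  | cons s t ih =>
    rw [show shiftL (s :: t) j = max (s - j) 0 :: shiftL t j from rfl, Zc_cons]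
    simp only [cumM, List.map_cons, List.sum_cons] at *
    by_cases h : s <= j
    · rw [if_pos (by omega : max (s - j) 0 = 0)]
      omega
    · rw [if_neg (by omega : ¬ max (s - j) 0 = 0)]
      omega

theorem pass_snd {k : Int} :
    ∀ (w : List Int) (temp : Int) (acc : List Int), temp < k →
      (aPassAux k w temp acc).2 = min (temp + Zc w) k := by
  intro w
  induction w with
  | nil => intro temp acc h; simp [aPassAux, Zc]; omega
  | cons s rest ih =>
    intro temp acc h
    have hz := Zc_nonneg rest
    rw [aPassAux]
    by_cases hs : s = 0
    · subst hs
      have hzc : Zc ((0:Int) :: rest) = 1 + Zc rest := by rw [Zc_cons]; norm_num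
      rw [hzc]
      simp only [ne_eq, not_true_eq_false, if_false]
      by_cases hb : temp + 1 = k
      · rw [if_pos hb]
        show temp + 1 = min (temp + (1 + Zc rest)) k
        omega
      · rw [if_neg hb, ih (temp + 1) _ (by omega)]
        omega
    · have hzc : Zc (s :: rest) = Zc rest := by rw [Zc_cons, if_neg hs]; ring
      rw [hzc]
      simp only [ne_eq, hs, not_false_eq_true, if_true]
      rw [if_neg (by omega : ¬ temp = k), ih temp _ h]

theorem pass_fst {k : Int} :
    ∀ (w : List Int) (temp : Int) (acc : List Int), temp + Zc w < k →
      aPassAux k w temp acc =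
        (acc.reverse ++ w.map (fun s => if s ≠ 0 then s - 1 else s), temp + Zc w) := by
  intro w
  induction w with
  | nil => intro temp acc h; simp [aPassAux, Zc]
  | cons s rest ih =>
    intro temp acc h
    have hz := Zc_nonneg rest
    rw [aPassAux]
    by_cases hs : s = 0
    · subst hs
      have hzc : Zc ((0:Int) :: rest) = 1 + Zc rest := by rw [Zc_cons]; norm_num
      rw [hzc] at h ⊢
      simp only [ne_eq, not_true_eq_false, if_false]
      rw [if_neg (by omega : ¬ temp + 1 = k), ih (temp + 1) _ (by omega)]
      simp only [List.map_cons, ne_eq, not_true_eq_false, if_false, List.reverse_cons,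
        List.append_assoc, List.cons_append, List.nil_append, Prod.mk.injEq]
      exact ⟨trivial, by omega⟩
    · have hzc : Zc (s :: rest) = Zc rest := by rw [Zc_cons, if_neg hs]; ring
      rw [hzc] at h ⊢
      simp only [ne_eq, hs, not_false_eq_true, if_true]
      rw [if_neg (by omega : ¬ temp = k), ih temp _ (by omega)]
      simp only [List.map_cons, ne_eq, hs, not_false_eq_true, if_true, List.reverse_cons,
        List.append_assoc, List.cons_append, List.nil_append]

theorem shift_map_dec (v : List Int) (j : Int) :
    (shiftL v j).map (fun s => if s ≠ 0 then s - 1 else s) = shiftL v (j + 1) := by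
  induction v with
  | nil => simp [shiftL]
  | cons s t ih =>
    simp only [shiftL, List.map_cons] at *
    rw [ih]
    congr 1
    by_cases h : s - j <= 0
    · rw [if_neg (by omega)]; omega
    · rw [if_pos (by omega)]; omega

theorem shift_sum_nonneg (v : List Int) (j : Int) : 0 <= (shiftL v j).sum := by
  induction v with
  | nil => simp [shiftL]
  | cons s t ih => simp only [shiftL, List.map_cons, List.sum_cons] at *; omega

theorem shift_sum_zero_iff (v : List Int) (j : Int) :
    (shiftL v j).sum = 0 ↔ ∀ s ∈ v, s <= j := by
  induction v with
  | nil => simp [shiftL]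
  | cons s t ih =>
    have := shift_sum_nonneg t j
    simp only [shiftL, List.map_cons, List.sum_cons, List.mem_cons] at *
    constructor
    · intro h x hx
      rcases hx with rfl | hx
      · omega
      · exact (ih.mp (by omega)) x hx
    · intro h
      have h1 := h s (Or.inl rfl)
      have h2 := ih.mpr (fun x hx => h x (Or.inr hx))
      omega

theorem shift_zero {v : List Int} (h : ∀ s ∈ v, 0 <= s) : shiftL v 0 = v := by
  induction v with
  | nil => simp [shiftL]
  | cons s t ih =>
    simp only [shiftL, List.map_cons] at *
    rw [ih (fun x hx => h x (List.mem_cons_of_mem _ hx))]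
    have := h s (List.mem_cons_self)
    congr 1
    omega

theorem cumM_zero {v : List Int} (h : ∀ s ∈ v, 0 <= s) : cumM v 0 = 0 := by
  induction v with
  | nil => simp [cumM]
  | cons s t ih =>
    have h1 := h s (List.mem_cons_self)
    have h2 := ih (fun x hx => h x (List.mem_cons_of_mem _ hx))
    simp only [cumM, List.map_cons, List.sum_cons] at *
    omega

theorem foldl_max_shift : ∀ (t : List Int) (a b : Int), t.foldl max (max a b) = max a (t.foldl max b) := by
  intro t
  induction t with
  | nil => intro a b; simp
  | cons s r ih =>
    intro a b
    simp only [List.foldl_cons]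
    rw [max_assoc, ih]

theorem le_foldl_max_init : ∀ (v : List Int) (b : Int), b <= v.foldl max b := by
  intro v
  induction v with
  | nil => intro b; simp
  | cons s t ih =>
    intro b
    simp only [List.foldl_cons]
    exact le_trans (le_max_left b s) (ih (max b s))

theorem mem_le_foldl_max : ∀ {v : List Int} {s : Int} (b : Int), s ∈ v → s <= v.foldl max b := by
  intro v
  induction v with
  | nil => intro s b h; simp at h
  | cons x t ih =>
    intro s b h
    rcases List.mem_cons.mp h with rfl | h
    · exact le_trans (le_max_right b s) (le_foldl_max_init t _)
    · exact ih _ h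

theorem foldl_max_le : ∀ (v : List Int) (b c : Int), b <= c → (∀ s ∈ v, s <= c) → v.foldl max b <= c := by
  intro v
  induction v with
  | nil => intro b c h _; simpa
  | cons x t ih =>
    intro b c h hall
    simp only [List.foldl_cons]
    exact ih _ _ (max_le h (hall x List.mem_cons_self)) (fun s hs => hall s (List.mem_cons_of_mem _ hs))

theorem aLoop_notlt {k : Int} (fuel : Nat) (stones : List Int) (temp answer : Int)
    (h : ¬ temp < k) : aLoop k fuel stones temp answer = answer := by
  cases fuel <;> simp [aLoop, h]

theorem aLoop_char {k : Int} :
    ∀ (fuel : Nat) (v : List Int) (j : Int), (∀ s ∈ v, 0 <= s) → 1 <= k → 0 <= j →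
      j < mcap v → cumM v j < k → (mcap v - j).toNat + 1 <= fuel →
      CharS v k (aLoop k fuel (shiftL v j) (cumM v j) j) := by
  intro fuel
  induction fuel with
  | zero => intro v j _ _ _ _ _ hfuel; omega
  | succ n ih =>
    intro v j hpre hk hj hjcap hcum hfuel
    rw [aLoop, if_pos hcum]
    have hz := Zc_nonneg (shiftL v j)
    have hsucc := cumM_succ v j
    by_cases hbig : k <= cumM v (j + 1)
    · -- temp reaches k during this pass: both branches return j+1
      have hsnd : (aPassAux k (shiftL v j) (cumM v j) []).2 = k := by
        rw [pass_snd _ _ _ hcum]; omega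
      have hgoal : CharS v k (j + 1) := by
        refine ⟨by omega, by omega, Or.inl hbig, ?_⟩
        intro p h1 h2
        exact lt_of_le_of_lt (cumM_mono v (by omega : p <= j)) hcum
      by_cases hsum : (aPassAux k (shiftL v j) (cumM v j) []).1.sum = 0
      · rw [if_pos hsum]; exact hgoal
      · rw [if_neg hsum, hsnd, aLoop_notlt n _ _ _ (by omega)]
        exact hgoal
    · -- full pass without break
      push_neg at hbig
      have hfst := pass_fst (k := k) (shiftL v j) (cumM v j) [] (by omega)
      rw [hfst]
      simp only [List.reverse_nil, List.nil_append, shift_map_dec]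
      have hlow : ∀ p, 1 <= p → p < j + 1 → cumM v p < k := by
        intro p h1 h2
        exact lt_of_le_of_lt (cumM_mono v (by omega : p <= j)) hcum
      by_cases hsum : (shiftL v (j + 1)).sum = 0
      · rw [if_pos hsum]
        have hall : ∀ s ∈ v, s <= j + 1 := (shift_sum_zero_iff v (j + 1)).mp hsum
        have hfl : v.foldl max 0 <= j + 1 := foldl_max_le v 0 (j + 1) (by omega) hall
        have hcapv : mcap v = j + 1 := by unfold mcap at *; omega
        exact ⟨by omega, by omega, Or.inr hcapv.symm, hlow⟩
      · rw [if_neg hsum]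
        have hne : j + 1 < mcap v := by
          rcases lt_or_eq_of_le (by omega : j + 1 <= mcap v) with h | h
          · exact h
          · exfalso
            apply hsum
            rw [shift_sum_zero_iff]
            intro s hs
            have h1 := mem_le_foldl_max 0 hs
            unfold mcap at h
            omega
        rw [show cumM v j + Zc (shiftL v j) = cumM v (j + 1) from hsucc.symm]
        exact ih v (j + 1) hpre hk (by omega) hne (by omega) (by omega)

theorem solution_char {v : List Int} {k : Int} (hpre : ∀ s ∈ v, 0 <= s) (hk : 1 <= k) :
    CharS v k (solution v k) := by
  have hf0 : (0 : Int) <= v.foldl max 0 := le_foldl_max_init v 0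
  have h := aLoop_char (k := k) ((v.foldl max 0).toNat + 2) v 0 hpre hk le_rfl
    (by unfold mcap; omega) (by rw [cumM_zero hpre]; omega)
    (by unfold mcap; omega)
  rw [shift_zero hpre, cumM_zero hpre] at h
  exact h

theorem bsearch_char (v : List Int) (k : Int) :
    ∀ (n : Nat) (lo hi : Int), (hi - lo).toNat <= n → 1 <= lo → lo <= hi →
      k <= cumM v hi → (∀ p, 1 <= p → p < lo → cumM v p < k) →
      1 <= bsearchAlt v k lo hi ∧ bsearchAlt v k lo hi <= hi ∧
        k <= cumM v (bsearchAlt v k lo hi) ∧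
        ∀ p, 1 <= p → p < bsearchAlt v k lo hi → cumM v p < k := by
  intro n
  induction n with
  | zero =>
    intro lo hi hn h1 hlh hhi hlow
    have heq : lo = hi := by omega
    rw [bsearchAlt, dif_neg (by omega : ¬ lo < hi)]
    exact ⟨h1, hlh, heq ▸ hhi, hlow⟩
  | succ n ih =>
    intro lo hi hn h1 hlh hhi hlow
    by_cases hlt : lo < hi
    · rw [bsearchAlt, dif_pos hlt]
      have hm1 := (PySem.Int.le_floordiv_iff_mul_le (a := lo + hi) (b := 2) (q := lo) (by omega)).mpr (by omega)
      have hm2 := (PySem.Int.floordiv_lt_iff_lt_mul (a := lo + hi) (b := 2) (q := hi) (by omega)).mpr (by omega)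
      set mid := PySem.Int.floordiv (lo + hi) 2 with hmid
      by_cases hc : k <= cumAlt v mid
      · rw [if_pos hc]
        rw [cumAlt_eq_cumM] at hc
        exact ⟨(ih lo mid (by omega) h1 (by omega) hc hlow).1,
               le_trans (ih lo mid (by omega) h1 (by omega) hc hlow).2.1 (by omega),
               (ih lo mid (by omega) h1 (by omega) hc hlow).2.2⟩
      · rw [if_neg hc]
        rw [cumAlt_eq_cumM] at hc
        push_neg at hc
        refine ih (mid + 1) hi (by omega) (by omega) (by omega) hhi ?_
        intro p hp1 hp2
        rcases lt_or_ge p lo with h | h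
        · exact hlow p hp1 h
        · exact lt_of_le_of_lt (cumM_mono v (by omega : p <= mid)) hc
    · rw [bsearchAlt, dif_neg hlt]
      have heq : lo = hi := by omega
      exact ⟨h1, hlh, heq ▸ hhi, hlow⟩

theorem mcap_cons (x : Int) (t : List Int) : mcap (x :: t) = max (t.foldl max x) 1 := by
  unfold mcap
  simp only [List.foldl_cons]
  rw [show max (0 : Int) x = max 0 x from rfl, foldl_max_shift]
  omega

theorem alt_char {v : List Int} {k : Int} (hk : 1 <= k) :
    CharS v k (solution_alt v k) := by
  rw [solution_alt, if_neg (by omega : ¬ k <= 0)]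
  cases v with
  | nil =>
    have hnone : PySem.List.max? ([] : List Int) (fun x => x) = none :=
      (PySem.List.max?_eq_none_iff _ _).mpr rfl
    rw [hnone]
    simp only
    have hcap : mcap ([] : List Int) = 1 := by unfold mcap; simp
    have hcum : cumM ([] : List Int) 1 = 0 := by simp [cumM]
    rw [if_pos (by rw [cumAlt_eq_cumM, hcum]; omega)]
    exact ⟨le_rfl, by omega, Or.inr hcap.symm, by intro p h1 h2; omega⟩
  | cons x t =>
    rw [PySem.List.max?_id_cons]
    simp only
    rw [show max (t.foldl max x) 1 = mcap (x :: t) from (mcap_cons x t).symm]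
    have hcap1 : 1 <= mcap (x :: t) := by unfold mcap; omega
    by_cases hcc : cumAlt (x :: t) (mcap (x :: t)) < k
    · rw [if_pos hcc]
      rw [cumAlt_eq_cumM] at hcc
      refine ⟨hcap1, le_rfl, Or.inr rfl, ?_⟩
      intro p h1 h2
      exact lt_of_le_of_lt (cumM_mono _ (by omega : p <= mcap (x :: t))) hcc
    · rw [if_neg hcc]
      rw [cumAlt_eq_cumM] at hcc
      push_neg at hcc
      obtain ⟨a, b, c, d⟩ := bsearch_char (x :: t) k ((mcap (x :: t) - 1).toNat) 1 (mcap (x :: t))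
        le_rfl le_rfl hcap1 hcc (by intro p h1 h2; omega)
      exact ⟨a, b, Or.inl c, d⟩

theorem charS_uniq {v : List Int} {k r r' : Int} (h : CharS v k r) (h' : CharS v k r') : r = r' := by
  obtain ⟨h1, h2, h3, h4⟩ := h
  obtain ⟨h1', h2', h3', h4'⟩ := h'
  rcases lt_trichotomy r r' with hlt | heq | hgt
  · have := h4' r h1 hlt
    rcases h3 with hc | hc <;> omega
  · exact heq
  · have := h4 r' h1' hgt
    rcases h3' with hc | hc <;> omega

-- ===== VERDICT (by name: the statement is the Claim_ definition above) =====
theorem solution_spec : Claim_equal_solution := by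
  intro stones k _ hpre
  unfold Spec_solution
  by_cases hk : k <= 0
  · rw [solution, aLoop_notlt _ _ _ _ (by omega : ¬ (0:Int) < k),
        solution_alt, if_pos hk]
  · rcases hpre with hpre | hpre
    · omega
    · exact charS_uniq (solution_char hpre (by omega)) (alt_char (by omega))
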